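-- pv_equiv track=rewrite | github.com/mike-taylor99/aoc-2024 | day09/part2.py | find_starting_index
-- ===== SOURCE A (Python) =====
-- from typing import List, Tuple
--
-- def find_starting_index(disk_map: List[str], num: int) -> int:
--     """
--     Finds the starting index of the first sequence of `num` consecutive '.' characters in the given disk map.
--
--     Args:
--         disk_map (List[str]): A list of strings representing the disk map.
--         num (int): The number of consecutive '.' characters to find.
--
--     Returns:
--         int: The starting index of the first sequence of `num` consecutive '.' characters.
--              Returns -1 if no such sequence is found.
--     """
--     count = 0
--     for i, val in enumerate(disk_map):
--         if val == '.':
--             count += 1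
--             if count == num:
--                 return i - (count - 1)
--         else:
--             count = 0
--     return -1
-- ===== SOURCE B (Python) =====
-- def find_starting_index(disk_map, num):
--     if num <= 0 or num > len(disk_map):
--         return -1
--     canon = ''.join('.' if v == '.' else '#' for v in disk_map)
--     return canon.find('.' * num)
-- ===== Notes on version B (the rewrite author's own statement) =====
-- stated objective: idiomatic
-- what changed: Replaces A's explicit counter loop with string pattern matching: the list is canonicalized to a '.'/'#' string and the answer is str.find of the pattern '.'*num, after a natural guard returning -1 for num <= 0 or num > len(disk_map).
import Mathlib
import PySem

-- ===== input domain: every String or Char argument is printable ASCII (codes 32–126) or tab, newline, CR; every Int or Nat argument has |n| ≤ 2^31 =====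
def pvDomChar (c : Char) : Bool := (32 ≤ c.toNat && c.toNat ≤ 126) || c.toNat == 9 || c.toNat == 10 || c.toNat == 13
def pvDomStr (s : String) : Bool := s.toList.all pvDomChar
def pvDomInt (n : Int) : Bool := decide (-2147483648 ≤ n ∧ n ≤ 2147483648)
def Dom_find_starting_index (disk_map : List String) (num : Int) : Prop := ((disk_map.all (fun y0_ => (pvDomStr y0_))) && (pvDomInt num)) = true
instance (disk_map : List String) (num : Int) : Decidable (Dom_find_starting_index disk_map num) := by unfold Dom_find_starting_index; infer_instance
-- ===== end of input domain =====

-- B replaces A's explicit counter loop with string pattern matching: canonicalize to '.'/'#' chars and str.find the pattern '.'*num (same O(n) cost).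


-- ===== PORT A =====
-- A's loop: enumerate with a running count of consecutive dots, reset on non-dot.
def pvGoA (num : Int) : List String → Int → Int → Int
  | [], _, _ => -1
  | v :: rest, i, count =>
    if v == "." then
      if count + 1 = num then i - (count + 1 - 1)
      else pvGoA num rest (i + 1) (count + 1)
    else pvGoA num rest (i + 1) 0

def find_starting_index (disk_map : List String) (num : Int) : Int :=
  pvGoA num disk_map 0 0

-- ===== PORT B =====
-- ''.join('.' if v == '.' else '#' for v in disk_map): one canonical character per element.
def pvCanon (disk_map : List String) : List Char :=
  disk_map.map (fun v => if v == "." then '.' else '#')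

-- canon.find('.' * num) ported as PySem.Chars.find on the canonical char list ('.' * num = replicate).
def find_starting_index_alt (disk_map : List String) (num : Int) : Int :=
  if num ≤ 0 ∨ (disk_map.length : Int) < num then -1
  else PySem.Chars.find (pvCanon disk_map) (List.replicate num.toNat '.')

-- ===== PRECONDITION & SPEC =====
def Spec_find_starting_index (disk_map : List String) (num : Int) (out : Int) : Prop := out = find_starting_index_alt disk_map num
instance (disk_map : List String) (num : Int) (out : Int) : Decidable (Spec_find_starting_index disk_map num out) := by unfold Spec_find_starting_index; infer_instance

-- ===== CLAIM (what is proved, stated in full; the proofs are below) =====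
def Claim_equal_find_starting_index : Prop := ∀ (disk_map : List String) (num : Int), Dom_find_starting_index disk_map num → Spec_find_starting_index disk_map num (find_starting_index disk_map num)

-- ===== LEMMAS AND PROOFS =====

-- With num ≤ 0, A's count == num check never fires (count ≥ 1 when tested), so A returns -1.
theorem pvGoA_nonpos (num : Int) (hnum : num ≤ 0) :
    ∀ (l : List String) (i c : Int), 0 ≤ c → pvGoA num l i c = -1 := by
  intro l
  induction l with
  | nil => intro i c _; simp [pvGoA]
  | cons v rest ih =>
    intro i c hc
    simp only [pvGoA]
    split
    · rw [if_neg (by omega)]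
      exact ih (i + 1) (c + 1) (by omega)
    · exact ih (i + 1) 0 le_rfl

-- Proof-only reference matcher: first index ≥ i (as an offset) where pat is a prefix of the suffix.
def pvFindAux (pat : List Char) : List Char → Int → Int
  | [], i => if pat.isPrefixOf [] then i else -1
  | x :: rest, i => if pat.isPrefixOf (x :: rest) then i else pvFindAux pat rest (i + 1)

theorem pvFindAux_pos (pat s : List Char) (i : Int) (h : pat.isPrefixOf s = true) :
    pvFindAux pat s i = i := by
  cases s <;> simp [pvFindAux, h]

theorem pvIsPrefixOf_self_append (p t : List Char) : p.isPrefixOf (p ++ t) = true := by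
  rw [List.isPrefixOf_iff_prefix]
  exact List.prefix_append p t

theorem pvIsPrefixOf_rep_short :
    ∀ (c n : Nat), c < n → (List.replicate n '.').isPrefixOf (List.replicate c '.') = false := by
  intro c
  induction c with
  | zero =>
    intro n hn
    cases n with
    | zero => omega
    | succ m => simp [List.replicate]
  | succ c ih =>
    intro n hn
    cases n with
    | zero => omega
    | succ m =>
      simp only [List.replicate, List.isPrefixOf, beq_self_eq_true, Bool.true_and]
      exact ih m (by omega)

theorem pvIsPrefixOf_rep_hash (t : List Char) :
    ∀ (c n : Nat), c < n →
      (List.replicate n '.').isPrefixOf (List.replicate c '.' ++ '#' :: t) = false := by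
  intro c
  induction c with
  | zero =>
    intro n hn
    cases n with
    | zero => omega
    | succ m => simp [List.replicate, List.isPrefixOf]
  | succ c ih =>
    intro n hn
    cases n with
    | zero => omega
    | succ m =>
      simp only [List.replicate, List.cons_append, List.isPrefixOf, beq_self_eq_true,
        Bool.true_and]
      exact ih m (by omega)

-- Scanning a too-short all-dot tail yields -1.
theorem pvFindAux_rep_nil (n : Nat) :
    ∀ (c : Nat) (j : Int), c < n →
      pvFindAux (List.replicate n '.') (List.replicate c '.') j = -1 := by
  intro c
  induction c with
  | zero =>
    intro j hc
    have h := pvIsPrefixOf_rep_short 0 n hc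
    simp only [List.replicate_zero] at h
    simp [pvFindAux, h]
  | succ c ih =>
    intro j hc
    have h := pvIsPrefixOf_rep_short (c + 1) n hc
    rw [List.replicate_succ] at h ⊢
    simp only [pvFindAux, h, Bool.false_eq_true, if_false]
    exact ih (j + 1) (by omega)

-- Skipping c leading dots followed by a '#' advances the scan past them.
theorem pvFindAux_skip (n : Nat) (t : List Char) :
    ∀ (c : Nat) (j : Int), c < n →
      pvFindAux (List.replicate n '.') (List.replicate c '.' ++ '#' :: t) j
        = pvFindAux (List.replicate n '.') t (j + c + 1) := by
  intro c
  induction c with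
  | zero =>
    intro j hc
    have h := pvIsPrefixOf_rep_hash t 0 n hc
    simp only [List.replicate_zero, List.nil_append] at h ⊢
    simp [pvFindAux, h]
  | succ c ih =>
    intro j hc
    have h := pvIsPrefixOf_rep_hash t (c + 1) n hc
    rw [List.replicate_succ] at h ⊢
    simp only [List.cons_append] at h ⊢
    simp only [pvFindAux]
    rw [if_neg (by simp [h])]
    rw [ih (j + 1) (by omega)]
    congr 1
    push_cast
    ring

-- Main invariant: A mid-scan at index i with c pending dots equals the reference matcher
-- run on c re-prepended dots, started at offset i - c.
theorem pvMain (num : Int) (hnum : 1 ≤ num) :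
    ∀ (l : List String) (i c : Int), 0 ≤ c → c < num →
      pvGoA num l i c
        = pvFindAux (List.replicate num.toNat '.')
            (List.replicate c.toNat '.' ++ pvCanon l) (i - c) := by
  intro l
  induction l with
  | nil =>
    intro i c hc hlt
    simp only [pvGoA, pvCanon, List.map_nil, List.append_nil]
    rw [pvFindAux_rep_nil num.toNat c.toNat (i - c) (by omega)]
  | cons x xs ih =>
    intro i c hc hlt
    by_cases hx : (x == ".") = true
    · have hxe : x = "." := by simpa using hx
      have hcanon : pvCanon (x :: xs) = '.' :: pvCanon xs := by
        simp [pvCanon, hxe]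
      have hrep : List.replicate c.toNat '.' ++ '.' :: pvCanon xs
          = List.replicate (c + 1).toNat '.' ++ pvCanon xs := by
        have h3 : (c + 1).toNat = c.toNat + 1 := by omega
        rw [h3, List.replicate_succ']
        simp
      simp only [pvGoA, hx, if_true, hcanon, hrep]
      by_cases heq : c + 1 = num
      · rw [if_pos heq]
        rw [pvFindAux_pos _ _ _ ?_]
        · omega
        · have h4 : (c + 1).toNat = num.toNat := by omega
          rw [h4]
          exact pvIsPrefixOf_self_append _ _
      · rw [if_neg heq]
        rw [ih (i + 1) (c + 1) (by omega) (by omega)]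
        have h2 : i + 1 - (c + 1) = i - c := by omega
        rw [h2]
    · have hx' : (x == ".") = false := by simpa using hx
      have hxe : ¬ x = "." := by simpa using hx
      have hcanon : pvCanon (x :: xs) = '#' :: pvCanon xs := by
        simp [pvCanon, hxe]
      simp only [pvGoA, hx', Bool.false_eq_true, if_false, hcanon]
      rw [ih (i + 1) 0 le_rfl (by omega)]
      rw [pvFindAux_skip num.toNat (pvCanon xs) c.toNat (i - c) (by omega)]
      simp only [Int.toNat_zero, List.replicate_zero, List.nil_append]
      congr 1
      omega

-- The reference matcher from offset i finds the first match at absolute offset i + k.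
theorem pvFindAux_of_first_match (pat : List Char) (hpat : pat ≠ []) :
    ∀ (s : List Char) (k : Nat) (i : Int),
      pat <+: s.drop k → (∀ j, j < k → ¬ pat <+: s.drop j) →
      pvFindAux pat s i = i + k := by
  intro s
  induction s with
  | nil =>
    intro k i hk _
    simp only [List.drop_nil] at hk
    exact absurd (List.prefix_nil.mp hk) hpat
  | cons x xs ih =>
    intro k i hk hmin
    cases k with
    | zero =>
      rw [pvFindAux_pos _ _ _ (List.isPrefixOf_iff_prefix.mpr (by simpa using hk))]
      simp
    | succ k =>
      have hnp : ¬ pat <+: (x :: xs) := by simpa using hmin 0 (by omega)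
      simp only [pvFindAux]
      rw [if_neg (by simpa [List.isPrefixOf_iff_prefix] using hnp)]
      rw [ih k (i + 1) (by simpa using hk) ?_]
      · push_cast
        ring
      · intro j hj hpre
        exact hmin (j + 1) (by omega) (by simpa using hpre)

-- The reference matcher returns -1 when no suffix matches.
theorem pvFindAux_of_no_match (pat : List Char) :
    ∀ (s : List Char) (i : Int),
      (∀ j, ¬ pat <+: s.drop j) → pvFindAux pat s i = -1 := by
  intro s
  induction s with
  | nil =>
    intro i h
    have h0 := h 0
    simp only [List.drop_nil] at h0
    simp [pvFindAux, List.isPrefixOf_iff_prefix, h0]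
  | cons x xs ih =>
    intro i h
    have hnp : ¬ pat <+: (x :: xs) := by simpa using h 0
    simp only [pvFindAux]
    rw [if_neg (by simpa [List.isPrefixOf_iff_prefix] using hnp)]
    exact ih (i + 1) (fun j => by simpa using h (j + 1))

-- The reference matcher from offset 0 is PySem.Chars.find.
theorem pvFindAux_eq_find (pat s : List Char) (hpat : pat ≠ []) :
    pvFindAux pat s 0 = PySem.Chars.find s pat := by
  rcases lt_or_eq_of_le (PySem.Chars.neg_one_le_find s pat) with hpos | hneg
  · have h0 : 0 ≤ PySem.Chars.find s pat := by omega
    obtain ⟨hpre, hmin⟩ := PySem.Chars.find_spec h0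
    rw [pvFindAux_of_first_match pat hpat s (PySem.Chars.find s pat).toNat 0 hpre hmin]
    omega
  · rw [← hneg]
    apply pvFindAux_of_no_match pat
    intro j hpre
    have : pat <:+: s := (List.infix_iff_prefix_suffix.mpr ⟨_, hpre, List.drop_suffix j s⟩)
    exact (PySem.Chars.find_eq_neg_one_iff s pat).mp hneg.symm this

-- ===== VERDICT (by name: the statement is the Claim_ definition above) =====
theorem find_starting_index_spec : Claim_equal_find_starting_index := by
  intro disk_map num _
  unfold Spec_find_starting_index find_starting_index find_starting_index_alt
  by_cases hnum : num ≤ 0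
  · rw [if_pos (Or.inl hnum)]
    exact pvGoA_nonpos num hnum disk_map 0 0 le_rfl
  · have h1 : (1 : Int) ≤ num := by omega
    rw [pvMain num h1 disk_map 0 0 le_rfl (by omega)]
    simp only [Int.toNat_zero, List.replicate_zero, List.nil_append, sub_zero]
    by_cases hlen : (disk_map.length : Int) < num
    · rw [if_pos (Or.inr hlen)]
      apply pvFindAux_of_no_match
      intro j hpre
      have hle := hpre.length_le
      simp only [List.length_replicate, List.length_drop, pvCanon, List.length_map] at hle
      omega
    · rw [if_neg (not_or.mpr ⟨hnum, hlen⟩)]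
      have hpat : List.replicate num.toNat '.' ≠ [] := by
        simp only [ne_eq, List.replicate_eq_nil_iff]
        omega
      exact pvFindAux_eq_find _ _ hpat
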